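-- pv_equiv track=rewrite | github.com/MVCowley/tagbrewer | src/tagbrewer/tag/generators.py | find_unique_tags
-- ===== SOURCE A (Python) =====
-- import collections
-- from typing import Dict, FrozenSet, DefaultDict, Tuple, List
--
-- def find_unique_tags(gene_group_tags: Dict[str, List]) -> Dict[str, List[str]]:
--
--     unique_tags = collections.defaultdict(list)
--     for gene, possible_tags in gene_group_tags.items():
--         check_list = []
--         for check_gene, check_possible_tags in gene_group_tags.items():
--             if gene not in check_gene:
--                 check_list.extend(check_possible_tags)
--         for test_tag in possible_tags:
--             if test_tag in check_list:
--                 continue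
--             else:
--                 unique_tags[gene].append(test_tag)
--
--     return unique_tags
-- ===== SOURCE B (Python) =====
-- import collections
--
-- def find_unique_tags(gene_group_tags):
--     # Inverted index: tag -> list of genes whose tag list contains it (built in one pass).
--     tag_owners = collections.defaultdict(list)
--     for gene, tags in gene_group_tags.items():
--         for t in tags:
--             tag_owners[t].append(gene)
--     unique_tags = collections.defaultdict(list)
--     for gene, tags in gene_group_tags.items():
--         for t in tags:
--             if all(gene in owner for owner in tag_owners[t]):
--                 unique_tags[gene].append(t)
--     return unique_tags
-- ===== Notes on version B (the rewrite author's own statement) =====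
-- stated objective: faster
-- what changed: B replaces A's per-gene rebuilding of a concatenated check_list (a full rescan of all genes' tags for every gene) with an inverted index tag -> owner genes built once, keeping a tag iff every owner gene contains the tested gene as a substring.
import Mathlib
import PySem

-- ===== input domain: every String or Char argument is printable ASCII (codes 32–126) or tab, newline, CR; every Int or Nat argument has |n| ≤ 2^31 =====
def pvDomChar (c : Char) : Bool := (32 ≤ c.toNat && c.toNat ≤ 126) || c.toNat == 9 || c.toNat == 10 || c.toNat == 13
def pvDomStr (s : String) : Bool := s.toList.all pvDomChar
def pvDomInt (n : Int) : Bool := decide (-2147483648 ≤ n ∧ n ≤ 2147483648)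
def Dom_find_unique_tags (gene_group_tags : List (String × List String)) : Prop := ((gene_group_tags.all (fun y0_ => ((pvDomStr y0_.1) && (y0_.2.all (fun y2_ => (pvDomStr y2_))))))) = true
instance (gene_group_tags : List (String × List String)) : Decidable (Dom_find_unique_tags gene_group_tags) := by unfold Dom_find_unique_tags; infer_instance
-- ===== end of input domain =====

-- B builds the tag -> owner-genes inverted index once instead of A's per-gene rescan of all tags (faster in a timing run on large inputs).

-- ===== PORT A =====
-- check_list for one gene: tags of every check_gene with 'gene not in check_gene' (substring test)
def fut_check_list (gene : String) (gene_group_tags : List (String × List String)) : List String :=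
  gene_group_tags.foldl
    (fun acc p => if PySem.Str.isIn gene p.1 then acc else acc ++ p.2) []

def find_unique_tags (gene_group_tags : List (String × List String)) : List (String × List String) :=
  (gene_group_tags.foldl
    (fun ut p =>
      let check_list := fut_check_list p.1 gene_group_tags
      p.2.foldl
        (fun ut t =>
          if check_list.contains t then ut
          else ut.insert p.1 (ut.getD p.1 [] ++ [t]))
        ut)
    PySem.Dict.empty).items

-- ===== PORT B =====
-- inverted index: tag -> list of genes whose tag list contains it (appended per occurrence)
def fut_tag_owners (gene_group_tags : List (String × List String)) : PySem.Dict String (List String) :=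
  gene_group_tags.foldl
    (fun d p => p.2.foldl (fun d t => d.insert t (d.getD t [] ++ [p.1])) d)
    PySem.Dict.empty

def find_unique_tags_alt (gene_group_tags : List (String × List String)) : List (String × List String) :=
  let idx := fut_tag_owners gene_group_tags
  (gene_group_tags.foldl
    (fun ut p =>
      p.2.foldl
        (fun ut t =>
          if (idx.getD t []).all (fun c => PySem.Str.isIn p.1 c) then
            ut.insert p.1 (ut.getD p.1 [] ++ [t])
          else ut)
        ut)
    PySem.Dict.empty).items

-- ===== PRECONDITION & SPEC =====
def Spec_find_unique_tags (gene_group_tags : List (String × List String)) (out : List (String × List String)) : Prop := out = find_unique_tags_alt gene_group_tags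
instance (gene_group_tags : List (String × List String)) (out : List (String × List String)) : Decidable (Spec_find_unique_tags gene_group_tags out) := by unfold Spec_find_unique_tags; infer_instance

-- ===== CLAIM (what is proved, stated in full; the proofs are below) =====
def Claim_equal_find_unique_tags : Prop := ∀ (gene_group_tags : List (String × List String)), Dom_find_unique_tags gene_group_tags → Spec_find_unique_tags gene_group_tags (find_unique_tags gene_group_tags)

-- ===== LEMMAS AND PROOFS =====

-- membership in A's check_list
theorem mem_fut_check_aux (gene : String) (l : List (String × List String))
    (acc : List String) (t : String) :
    t ∈ l.foldl (fun acc p => if PySem.Str.isIn gene p.1 then acc else acc ++ p.2) acc ↔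
      t ∈ acc ∨ ∃ p ∈ l, PySem.Str.isIn gene p.1 = false ∧ t ∈ p.2 := by
  induction l generalizing acc with
  | nil => simp
  | cons hd tl ih =>
    simp only [List.foldl_cons, ih, List.mem_cons]
    by_cases h : PySem.Str.isIn gene hd.1 = true
    · simp only [h, if_true]
      constructor
      · rintro (h1 | ⟨p, hp, h2, h3⟩)
        · exact Or.inl h1
        · exact Or.inr ⟨p, Or.inr hp, h2, h3⟩
      · rintro (h1 | ⟨p, hp, h2, h3⟩)
        · exact Or.inl h1
        · rcases hp with rfl | hp'
          · rw [h] at h2; cases h2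
          · exact Or.inr ⟨p, hp', h2, h3⟩
    · rw [Bool.not_eq_true] at h
      simp only [h, Bool.false_eq_true, if_false, List.mem_append]
      constructor
      · rintro ((h1 | h1) | ⟨p, hp, h2, h3⟩)
        · exact Or.inl h1
        · exact Or.inr ⟨hd, Or.inl rfl, h, h1⟩
        · exact Or.inr ⟨p, Or.inr hp, h2, h3⟩
      · rintro (h1 | ⟨p, hp, h2, h3⟩)
        · exact Or.inl (Or.inl h1)
        · rcases hp with rfl | hp'
          · exact Or.inl (Or.inr h3)
          · exact Or.inr ⟨p, hp', h2, h3⟩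

theorem mem_fut_check (gene t : String) (l : List (String × List String)) :
    t ∈ fut_check_list gene l ↔ ∃ p ∈ l, PySem.Str.isIn gene p.1 = false ∧ t ∈ p.2 := by
  unfold fut_check_list
  rw [mem_fut_check_aux]
  simp

-- membership in B's inverted index: inner loop over one gene's tags
theorem mem_owners_inner (g : String) (ts : List String)
    (d : PySem.Dict String (List String)) (t c : String) :
    c ∈ (ts.foldl (fun d t' => d.insert t' (d.getD t' [] ++ [g])) d).getD t [] ↔
      c ∈ d.getD t [] ∨ (t ∈ ts ∧ c = g) := by
  induction ts generalizing d with
  | nil => simp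
  | cons hd tl ih =>
    simp only [List.foldl_cons, ih, PySem.Dict.getD_insert, List.mem_cons]
    by_cases h : t = hd
    · subst h
      simp only [if_true, List.mem_append, List.mem_singleton]
      tauto
    · simp only [h, if_false]
      tauto

-- membership in B's inverted index: outer loop
theorem mem_owners_aux (l : List (String × List String))
    (d : PySem.Dict String (List String)) (t c : String) :
    c ∈ (l.foldl (fun d p => p.2.foldl (fun d t' => d.insert t' (d.getD t' [] ++ [p.1])) d) d).getD t [] ↔
      c ∈ d.getD t [] ∨ ∃ p ∈ l, t ∈ p.2 ∧ c = p.1 := by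
  induction l generalizing d with
  | nil => simp
  | cons hd tl ih =>
    simp only [List.foldl_cons, ih, mem_owners_inner, List.mem_cons]
    constructor
    · rintro ((h1 | ⟨h2, h3⟩) | ⟨p, hp, h2, h3⟩)
      · exact Or.inl h1
      · exact Or.inr ⟨hd, Or.inl rfl, h2, h3⟩
      · exact Or.inr ⟨p, Or.inr hp, h2, h3⟩
    · rintro (h1 | ⟨p, rfl | hp, h2, h3⟩)
      · exact Or.inl (Or.inl h1)
      · exact Or.inl (Or.inr ⟨h2, h3⟩)
      · exact Or.inr ⟨p, hp, h2, h3⟩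

theorem mem_owners (l : List (String × List String)) (t c : String) :
    c ∈ (fut_tag_owners l).getD t [] ↔ ∃ p ∈ l, t ∈ p.2 ∧ c = p.1 := by
  unfold fut_tag_owners
  rw [mem_owners_aux]
  simp

-- 't is in A's check_list for gene g' iff 'some owner of t does not contain g'
theorem key_iff (l : List (String × List String)) (g t : String) :
    t ∈ fut_check_list g l ↔
      ∃ c ∈ (fut_tag_owners l).getD t [], ¬ PySem.Str.isIn g c = true := by
  rw [mem_fut_check]
  constructor
  · rintro ⟨p, hp, hni, ht⟩
    exact ⟨p.1, (mem_owners l t p.1).mpr ⟨p, hp, ht, rfl⟩, by simpa using hni⟩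
  · rintro ⟨c, hc, hni⟩
    rcases (mem_owners l t c).mp hc with ⟨p, hp, ht, rfl⟩
    exact ⟨p, hp, by simpa using hni, ht⟩

-- the two per-tag boolean tests are complementary
theorem cond_eq (l : List (String × List String)) (g t : String) :
    (fut_check_list g l).contains t =
      !(((fut_tag_owners l).getD t []).all (fun c => PySem.Str.isIn g c)) := by
  cases hc : (fut_check_list g l).contains t with
  | false =>
    have hnm : t ∉ fut_check_list g l := by simpa using hc
    have hall : (((fut_tag_owners l).getD t []).all (fun c => PySem.Str.isIn g c)) = true := by
      rw [List.all_eq_true]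
      intro c hcm
      by_contra hni
      exact hnm ((key_iff l g t).mpr ⟨c, hcm, by simpa using hni⟩)
    rw [hall]
    rfl
  | true =>
    have hm : t ∈ fut_check_list g l := by simpa using hc
    rcases (key_iff l g t).mp hm with ⟨c, hcm, hni⟩
    have hall : (((fut_tag_owners l).getD t []).all (fun c => PySem.Str.isIn g c)) = false := by
      rw [List.all_eq_false]
      exact ⟨c, hcm, hni⟩
    rw [hall]
    rfl

-- ===== VERDICT (by name: the statement is the Claim_ definition above) =====
theorem find_unique_tags_spec : Claim_equal_find_unique_tags := by
  intro ggt _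
  unfold Spec_find_unique_tags find_unique_tags find_unique_tags_alt
  have hfun :
      (fun (ut : PySem.Dict String (List String)) (p : String × List String) =>
        p.2.foldl
          (fun ut t =>
            if (fut_check_list p.1 ggt).contains t then ut
            else ut.insert p.1 (ut.getD p.1 [] ++ [t])) ut) =
      (fun (ut : PySem.Dict String (List String)) (p : String × List String) =>
        p.2.foldl
          (fun ut t =>
            if ((fut_tag_owners ggt).getD t []).all (fun c => PySem.Str.isIn p.1 c) then
              ut.insert p.1 (ut.getD p.1 [] ++ [t])
            else ut) ut) := by
    funext ut p
    have hstep :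
        (fun (ut : PySem.Dict String (List String)) (t : String) =>
          if (fut_check_list p.1 ggt).contains t then ut
          else ut.insert p.1 (ut.getD p.1 [] ++ [t])) =
        (fun (ut : PySem.Dict String (List String)) (t : String) =>
          if ((fut_tag_owners ggt).getD t []).all (fun c => PySem.Str.isIn p.1 c) then
            ut.insert p.1 (ut.getD p.1 [] ++ [t])
          else ut) := by
      funext ut t
      rw [cond_eq ggt p.1 t]
      cases h : ((fut_tag_owners ggt).getD t []).all (fun c => PySem.Str.isIn p.1 c) <;> simp
    rw [hstep]
  rw [hfun]
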